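-- pv_equiv track=rewrite | github.com/LucyyyyyyT/markdown-compiler | markdown_compiler/util/line_functions.py | compile_bold_underscore
-- ===== SOURCE A (Python) =====
-- def compile_bold_underscore(line):
--     result = ""
--     i = 0
--
--     while i < len(line):
--         if line[i:i + 2] == "__" and line.find("__", i + 2) != -1:
--             end = line.find("__", i + 2)
--             result += "<b>" + line[i + 2:end] + "</b>"
--             i = end + 2
--         else:
--             result += line[i]
--             i += 1
--
--     return result
-- ===== SOURCE B (Python) =====
-- def compile_bold_underscore(line):
--     out = []
--     pos = 0
--     while True:
--         start = line.find("__", pos)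
--         end = -1 if start == -1 else line.find("__", start + 2)
--         if end == -1:
--             out.append(line[pos:])
--             return "".join(out)
--         out.append(line[pos:start])
--         out.append("<b>")
--         out.append(line[start + 2:end])
--         out.append("</b>")
--         pos = end + 2
-- ===== Notes on version B (the rewrite author's own statement) =====
-- stated objective: faster
-- what changed: A scans character by character, re-running line.find at every '__' it meets and growing the result string one char at a time; B jumps directly from one '__...__' pair to the next with find, slicing the untouched text between pairs in one piece and joining a piece list at the end.
import Mathlib
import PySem

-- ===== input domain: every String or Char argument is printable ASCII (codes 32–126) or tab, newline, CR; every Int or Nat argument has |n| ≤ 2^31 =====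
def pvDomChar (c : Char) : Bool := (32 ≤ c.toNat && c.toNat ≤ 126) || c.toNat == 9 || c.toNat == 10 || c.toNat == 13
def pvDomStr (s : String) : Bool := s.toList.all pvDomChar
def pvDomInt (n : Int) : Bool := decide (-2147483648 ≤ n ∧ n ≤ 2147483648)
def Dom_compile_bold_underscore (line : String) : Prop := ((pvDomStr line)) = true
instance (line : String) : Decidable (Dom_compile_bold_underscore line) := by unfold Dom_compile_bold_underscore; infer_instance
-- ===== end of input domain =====

-- B replaces A's char-by-char scan (which re-runs line.find at every "__" it meets) with direct
-- find-jumps from one "__…__" pair to the next, collecting whole slices in a piece list joined at the end.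

-- ===== PORT A =====
-- A's while loop: state (i, result); the loop advances i by at least 1 each pass, so
-- fuel = len(line) + 1 is never exhausted (proved via pvDecA below)
def pvGoA (s : List Char) : Nat → Nat → List Char → List Char
  | 0, _, result => result
  | fuel + 1, i, result =>
    if h : i < s.length then
      if hc : PySem.List.slice s (some (i : Int)) (some ((i : Int) + 2)) = ['_', '_'] ∧
          PySem.Chars.findFrom s ['_','_'] ((i : Int) + 2) none ≠ -1 then
        pvGoA s fuel ((PySem.Chars.findFrom s ['_','_'] ((i : Int) + 2) none).toNat + 2)
          (result ++ ['<','b','>'] ++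
            PySem.List.slice s (some ((i : Int) + 2))
              (some (PySem.Chars.findFrom s ['_','_'] ((i : Int) + 2) none)) ++
            ['<','/','b','>'])
      else
        pvGoA s fuel (i + 1) (result ++ [s[i]])
    else result

def compile_bold_underscore (line : String) : String :=
  String.ofList (pvGoA line.toList (line.toList.length + 1) 0 [])

-- ===== PORT B =====
-- B's while-True loop: find the opening "__" and its closing "__"; emit the pieces and jump to end+2
-- (the loop runs at most once per 4 chars plus a final return, so fuel = len(line) + 1 is never exhausted)
def pvGoB (s : List Char) : Nat → Nat → List (List Char) → List Char
  | 0, pos, out => PySem.Chars.join [] out ++ s.drop pos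
  | fuel + 1, pos, out =>
    let start := PySem.Chars.findFrom s ['_','_'] (pos : Int) none
    let e := if start = -1 then (-1 : Int)
             else PySem.Chars.findFrom s ['_','_'] (start + 2) none
    if e = -1 then
      PySem.Chars.join [] (out ++ [PySem.List.slice s (some (pos : Int)) none])
    else
      pvGoB s fuel (e.toNat + 2)
        (out ++ [PySem.List.slice s (some (pos : Int)) (some start), ['<','b','>'],
                 PySem.List.slice s (some (start + 2)) (some e), ['<','/','b','>']])

def compile_bold_underscore_alt (line : String) : String :=
  String.ofList (pvGoB line.toList (line.toList.length + 1) 0 [])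

-- ===== PRECONDITION & SPEC =====
def Spec_compile_bold_underscore (line : String) (out : String) : Prop := out = compile_bold_underscore_alt line
instance (line : String) (out : String) : Decidable (Spec_compile_bold_underscore line out) := by unfold Spec_compile_bold_underscore; infer_instance

-- ===== CLAIM (what is proved, stated in full; the proofs are below) =====
def Claim_equal_compile_bold_underscore : Prop := ∀ (line : String), Dom_compile_bold_underscore line → Spec_compile_bold_underscore line (compile_bold_underscore line)

-- ===== LEMMAS AND PROOFS =====

theorem pvFind_gt_len (s sub : List Char) (k : Nat) (h : s.length < k) :
    PySem.Chars.findFrom s sub (k : Int) none = -1 := by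
  simp only [PySem.Chars.findFrom]
  have h1 : ¬ ((k:Int) < 0) := by omega
  have h2 : ((s.length:Int) < (k:Int)) := by exact_mod_cast h
  simp [h1, h2]

theorem pvPairAux (s : List Char) (k : Nat)
    (h : PySem.Chars.findFrom s ['_','_'] (k : Int) none ≠ -1) :
    k ≤ s.length ∧ 0 ≤ PySem.Chars.findFrom s ['_','_'] (k : Int) none ∧
      k ≤ (PySem.Chars.findFrom s ['_','_'] (k : Int) none).toNat ∧
      (PySem.Chars.findFrom s ['_','_'] (k : Int) none).toNat + 2 ≤ s.length ∧
      ['_','_'] <+: s.drop (PySem.Chars.findFrom s ['_','_'] (k : Int) none).toNat := by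
  have hk : k ≤ s.length := by
    by_contra hk
    exact h (pvFind_gt_len s _ k (by omega))
  obtain ⟨h1, h2, _⟩ := PySem.Chars.findFrom_natCast_spec s ['_','_'] k hk h
  have hlen : (PySem.Chars.findFrom s ['_','_'] (k : Int) none).toNat + 2 ≤ s.length := by
    have := h2.length_le
    simp at this
    omega
  exact ⟨hk, by omega, by omega, hlen, h2⟩

-- compact decrease facts, cited in the ports' decreasing_by (keeps the recursion's proof terms small)
theorem pvDecA (s : List Char) (i : Nat) (h : i < s.length)
    (h2 : PySem.Chars.findFrom s ['_','_'] ((i : Int) + 2) none ≠ -1) :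
    s.length - ((PySem.Chars.findFrom s ['_','_'] ((i : Int) + 2) none).toNat + 2) < s.length - i := by
  have hcast : ((i : Int) + 2) = ((i + 2 : Nat) : Int) := by push_cast; ring
  have := pvPairAux s (i + 2) (by rw [← hcast]; exact h2)
  rw [hcast]
  omega

theorem pvDecA' (s : List Char) (i : Nat) (h : i < s.length) :
    s.length - (i + 1) < s.length - i := by omega

theorem pvDecB (s : List Char) (pos : Nat)
    (he : ¬ (if PySem.Chars.findFrom s ['_','_'] (pos : Int) none = -1 then (-1 : Int)
             else PySem.Chars.findFrom s ['_','_']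
               (PySem.Chars.findFrom s ['_','_'] (pos : Int) none + 2) none) = -1) :
    s.length - ((if PySem.Chars.findFrom s ['_','_'] (pos : Int) none = -1 then (-1 : Int)
                 else PySem.Chars.findFrom s ['_','_']
                   (PySem.Chars.findFrom s ['_','_'] (pos : Int) none + 2) none).toNat + 2) <
      s.length - pos := by
  by_cases hst : PySem.Chars.findFrom s ['_','_'] (pos : Int) none = -1
  · simp [hst] at he
  · simp only [hst, ite_false] at he ⊢
    obtain ⟨hp1, hp2, hp3, hp4, _⟩ := pvPairAux s pos hst
    have hcast : PySem.Chars.findFrom s ['_','_'] (pos : Int) none + 2 =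
        (((PySem.Chars.findFrom s ['_','_'] (pos : Int) none).toNat + 2 : Nat) : Int) := by
      push_cast; omega
    rw [hcast] at he ⊢
    obtain ⟨hq1, hq2, hq3, hq4, _⟩ := pvPairAux s _ he
    omega


-- pure (accumulator-free) versions used only in the proofs
def pvFA (s : List Char) (i : Nat) : List Char :=
  if h : i < s.length then
    if hc : PySem.List.slice s (some (i : Int)) (some ((i : Int) + 2)) = ['_', '_'] ∧
        PySem.Chars.findFrom s ['_','_'] ((i : Int) + 2) none ≠ -1 then
      ['<','b','>'] ++
        PySem.List.slice s (some ((i : Int) + 2))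
          (some (PySem.Chars.findFrom s ['_','_'] ((i : Int) + 2) none)) ++
        ['<','/','b','>'] ++ pvFA s ((PySem.Chars.findFrom s ['_','_'] ((i : Int) + 2) none).toNat + 2)
    else s[i] :: pvFA s (i + 1)
  else []
termination_by s.length - i
decreasing_by
  · exact pvDecA s i h hc.2
  · exact pvDecA' s i h

def pvFB (s : List Char) (pos : Nat) : List Char :=
  let start := PySem.Chars.findFrom s ['_','_'] (pos : Int) none
  let e := if start = -1 then (-1 : Int)
           else PySem.Chars.findFrom s ['_','_'] (start + 2) none
  if he : e = -1 then s.drop pos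
  else
    PySem.List.slice s (some (pos : Int)) (some start) ++ ['<','b','>'] ++
      PySem.List.slice s (some (start + 2)) (some e) ++ ['<','/','b','>'] ++ pvFB s (e.toNat + 2)
termination_by s.length - pos
decreasing_by
  exact pvDecB s pos he

theorem pvInfix_iff (p t : List Char) : p <:+: t ↔ ∃ j, p <+: t.drop j := by
  rw [← PySem.Chars.isIn_iff_infix, ← PySem.Chars.exists_prefix_drop_iff_isIn]

theorem pvNoOcc (s : List Char) (k : Nat) (hk : k ≤ s.length)
    (h : PySem.Chars.findFrom s ['_','_'] (k : Int) none = -1) :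
    ∀ j, k ≤ j → ¬ ['_','_'] <+: s.drop j := by
  have hno := (PySem.Chars.findFrom_natCast_eq_neg_one_iff s ['_','_'] k hk).mp h
  intro j hj hpj
  apply hno
  rw [pvInfix_iff]
  exact ⟨j - k, by rw [List.drop_drop]; rw [show k + (j - k) = j by omega]; exact hpj⟩

theorem pvSliceEq (s : List Char) (j : Nat) :
    PySem.List.slice s (some (j : Int)) (some ((j : Int) + 2)) = ['_','_'] ↔
      ['_','_'] <+: s.drop j := by
  have hcast : ((j : Int) + 2) = ((j + 2 : Nat) : Int) := by push_cast; ring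
  rw [hcast, PySem.List.slice_natCast, show j + 2 - j = 2 by omega]
  constructor
  · intro h
    rw [List.prefix_iff_eq_take]
    simp [h]
  · intro h
    rw [List.prefix_iff_eq_take] at h
    simp at h
    exact h.symm

theorem pvFA_end (s : List Char) (i : Nat) (h : s.length ≤ i) : pvFA s i = [] := by
  rw [pvFA]
  simp [show ¬ i < s.length by omega]

theorem pvFB_drop (s : List Char) (pos : Nat)
    (h : (if PySem.Chars.findFrom s ['_','_'] (pos : Int) none = -1 then (-1 : Int)
          else PySem.Chars.findFrom s ['_','_']
            (PySem.Chars.findFrom s ['_','_'] (pos : Int) none + 2) none) = -1) :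
    pvFB s pos = s.drop pos := by
  rw [pvFB]
  simp only [h, dite_eq_ite, if_pos]

theorem pvFB_pair (s : List Char) (pos : Nat)
    (hs : PySem.Chars.findFrom s ['_','_'] (pos : Int) none ≠ -1)
    (he : PySem.Chars.findFrom s ['_','_']
        (PySem.Chars.findFrom s ['_','_'] (pos : Int) none + 2) none ≠ -1) :
    pvFB s pos =
      PySem.List.slice s (some (pos : Int)) (some (PySem.Chars.findFrom s ['_','_'] (pos : Int) none)) ++
      ['<','b','>'] ++
      PySem.List.slice s (some (PySem.Chars.findFrom s ['_','_'] (pos : Int) none + 2))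
        (some (PySem.Chars.findFrom s ['_','_']
          (PySem.Chars.findFrom s ['_','_'] (pos : Int) none + 2) none)) ++
      ['<','/','b','>'] ++
      pvFB s ((PySem.Chars.findFrom s ['_','_']
          (PySem.Chars.findFrom s ['_','_'] (pos : Int) none + 2) none).toNat + 2) := by
  rw [pvFB]
  simp only [hs, ite_false, he, dite_eq_ite, if_neg, not_false_iff]

-- run of else-branches: if no position ≥ i can start a bold pair, A copies the rest verbatim
theorem pvFA_drop (s : List Char) :
    ∀ n i, s.length - i ≤ n →
      (∀ j, i ≤ j → ¬ (PySem.List.slice s (some (j : Int)) (some ((j : Int) + 2)) = ['_','_'] ∧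
          PySem.Chars.findFrom s ['_','_'] ((j : Int) + 2) none ≠ -1)) →
      pvFA s i = s.drop i := by
  intro n
  induction n with
  | zero =>
    intro i h _
    rw [pvFA_end s i (by omega), List.drop_eq_nil_iff.mpr (by omega)]
  | succ n ih =>
    intro i h H
    by_cases hlen : i < s.length
    · rw [pvFA]
      simp only [hlen, dite_true, H i le_rfl, dite_false]
      rw [ih (i + 1) (by omega) (fun j hj => H j (by omega))]
      exact (List.drop_eq_getElem_cons hlen).symm
    · rw [pvFA_end s i (by omega), List.drop_eq_nil_iff.mpr (by omega)]

-- copy segment [i, st): no "__" starts there, so A copies it verbatim and continues at st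
theorem pvFA_copy (s : List Char) :
    ∀ m i st, st - i ≤ m → i ≤ st → st ≤ s.length →
      (∀ j, i ≤ j → j < st → ¬ ['_','_'] <+: s.drop j) →
      pvFA s i = (s.drop i).take (st - i) ++ pvFA s st := by
  intro m
  induction m with
  | zero =>
    intro i st h h1 _ _
    rw [show st = i by omega]
    simp
  | succ m ih =>
    intro i st h h1 h2 H
    by_cases hst : i = st
    · subst hst; simp
    · have hi : i < s.length := by omega
      have hcond : ¬ (PySem.List.slice s (some (i : Int)) (some ((i : Int) + 2)) = ['_','_'] ∧
          PySem.Chars.findFrom s ['_','_'] ((i : Int) + 2) none ≠ -1) := by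
        intro hc
        exact H i le_rfl (by omega) ((pvSliceEq s i).mp hc.1)
      rw [pvFA]
      simp only [hi, dite_true, hcond, dite_false]
      rw [ih (i + 1) st (by omega) (by omega) h2 (fun j hj => H j (by omega))]
      rw [show st - i = (st - (i + 1)) + 1 by omega, List.drop_eq_getElem_cons hi,
        List.take_succ_cons, List.cons_append]

theorem pvAB_end (s : List Char) (i : Nat) (h : s.length ≤ i) : pvFA s i = pvFB s i := by
  rw [pvFA_end s i h]
  by_cases hs : PySem.Chars.findFrom s ['_','_'] (i : Int) none = -1
  · rw [pvFB_drop s i (by simp [hs]), List.drop_eq_nil_iff.mpr (by omega)]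
  · obtain ⟨_, _, h3, h4, _⟩ := pvPairAux s i hs
    omega

theorem pvAB (s : List Char) : ∀ n i, s.length - i ≤ n → pvFA s i = pvFB s i := by
  intro n
  induction n with
  | zero => intro i h; exact pvAB_end s i (by omega)
  | succ n ih =>
    intro i h
    by_cases hlen : i < s.length
    · by_cases hs : PySem.Chars.findFrom s ['_','_'] (i : Int) none = -1
      · -- no "__" at all from i on: both copy the tail
        rw [pvFB_drop s i (by simp [hs])]
        refine pvFA_drop s (s.length - i) i le_rfl (fun j hj hc => ?_)
        exact pvNoOcc s i (by omega) hs j hj ((pvSliceEq s j).mp hc.1)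
      · obtain ⟨hp1, hp2, hp3, hp4, hp5⟩ := pvPairAux s i hs
        -- st: the first "__" at or after i
        set st := (PySem.Chars.findFrom s ['_','_'] (i : Int) none).toNat with hst_def
        have hstc : PySem.Chars.findFrom s ['_','_'] (i : Int) none = (st : Int) := by omega
        have hmin := (PySem.Chars.findFrom_natCast_spec s ['_','_'] i (by omega) hs).2.2
        have hcast2 : (st : Int) + 2 = ((st + 2 : Nat) : Int) := by push_cast; ring
        by_cases he : PySem.Chars.findFrom s ['_','_'] ((st + 2 : Nat) : Int) none = -1
        · -- a first "__" but no closing "__": both copy the tail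
          rw [pvFB_drop s i (by
            rw [hstc, if_neg (show ¬((st : Int) = -1) by omega), hcast2]; exact he)]
          refine pvFA_drop s (s.length - i) i le_rfl (fun j hj hc => ?_)
          have hPj : ['_','_'] <+: s.drop j := (pvSliceEq s j).mp hc.1
          have hjst : st ≤ j := by
            by_contra hlt
            exact hmin j hj (by omega) hPj
          have hcast3 : ((j : Int) + 2) = ((j + 2 : Nat) : Int) := by push_cast; ring
          rw [hcast3] at hc
          obtain ⟨_, _, hq3, hq4, hq5⟩ := pvPairAux s (j + 2) hc.2
          exact pvNoOcc s (st + 2) (by omega) he _ (by omega) hq5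
        · -- a full pair: copy [i, st), emit the bold block, continue after the closing "__"
          have he' : PySem.Chars.findFrom s ['_','_']
              (PySem.Chars.findFrom s ['_','_'] (i : Int) none + 2) none ≠ -1 := by
            rw [hstc, hcast2]; exact he
          obtain ⟨hq1, hq2, hq3, hq4, hq5⟩ := pvPairAux s (st + 2) he
          set en := (PySem.Chars.findFrom s ['_','_'] ((st + 2 : Nat) : Int) none).toNat with hen_def
          rw [pvFB_pair s i hs he']
          rw [pvFA_copy s (st - i) i st le_rfl (by omega) (by omega)
            (fun j hj1 hj2 => hmin j hj1 (by omega))]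
          -- unfold pvFA at st: the bold branch fires
          have hcond : PySem.List.slice s (some (st : Int)) (some ((st : Int) + 2)) = ['_','_'] ∧
              PySem.Chars.findFrom s ['_','_'] ((st : Int) + 2) none ≠ -1 := by
            refine ⟨(pvSliceEq s st).mpr hp5, ?_⟩
            rw [hcast2]; exact he
          rw [pvFA, dif_pos (show st < s.length by omega), dif_pos hcond]
          rw [hstc, hcast2]
          rw [← hen_def]
          rw [ih (en + 2) (by omega)]
          rw [PySem.List.slice_natCast s i st]
          simp [List.append_assoc]
    · exact pvAB_end s i (by omega)

theorem pvJoinNil (ps : List (List Char)) : PySem.Chars.join [] ps = ps.flatten := by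
  induction ps with
  | nil => rfl
  | cons a t ih =>
    cases t with
    | nil => simp [PySem.Chars.join, List.intercalate]
    | cons b t' =>
      rw [PySem.Chars.join_cons_cons, ih]
      simp

theorem pvGoA_eq (s : List Char) : ∀ (fuel i : Nat) (res : List Char), s.length - i < fuel →
    pvGoA s fuel i res = res ++ pvFA s i := by
  intro fuel
  induction fuel with
  | zero => intro i res h; exact absurd h (by omega)
  | succ fuel ih =>
    intro i res h
    by_cases h1 : i < s.length
    · simp only [pvGoA, dif_pos h1]
      by_cases hc : PySem.List.slice s (some (i : Int)) (some ((i : Int) + 2)) = ['_', '_'] ∧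
          PySem.Chars.findFrom s ['_','_'] ((i : Int) + 2) none ≠ -1
      · rw [dif_pos hc, ih _ _ (by have := pvDecA s i h1 hc.2; omega)]
        conv_rhs => rw [pvFA, dif_pos h1, dif_pos hc]
        simp [List.append_assoc]
      · rw [dif_neg hc, ih _ _ (by omega)]
        conv_rhs => rw [pvFA, dif_pos h1, dif_neg hc]
        simp
    · simp only [pvGoA, dif_neg h1, pvFA_end s i (by omega), List.append_nil]

theorem pvGoB_eq (s : List Char) : ∀ (fuel pos : Nat) (out : List (List Char)), s.length - pos < fuel →
    pvGoB s fuel pos out = PySem.Chars.join [] out ++ pvFB s pos := by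
  intro fuel
  induction fuel with
  | zero => intro pos out h; exact absurd h (by omega)
  | succ fuel ih =>
    intro pos out h
    simp only [pvGoB]
    by_cases hs : PySem.Chars.findFrom s ['_','_'] (pos : Int) none = -1
    · rw [if_pos (by simp [hs]), pvFB_drop s pos (by simp [hs])]
      rw [pvJoinNil, pvJoinNil, List.flatten_append]
      simp [PySem.List.slice_from s (show (0:Int) ≤ (pos:Int) by positivity)]
    · simp only [hs, ite_false]
      by_cases he : PySem.Chars.findFrom s ['_','_']
          (PySem.Chars.findFrom s ['_','_'] (pos : Int) none + 2) none = -1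
      · rw [if_pos he, pvFB_drop s pos (by simp [hs, he])]
        rw [pvJoinNil, pvJoinNil, List.flatten_append]
        simp [PySem.List.slice_from s (show (0:Int) ≤ (pos:Int) by positivity)]
      · rw [if_neg he]
        rw [ih _ _ (by have := pvDecB s pos (by simp [hs, he]); simp only [hs, ite_false] at this; omega)]
        rw [pvFB_pair s pos hs he]
        rw [pvJoinNil, pvJoinNil, List.flatten_append]
        simp [List.append_assoc]

-- ===== VERDICT (by name: the statement is the Claim_ definition above) =====
theorem compile_bold_underscore_spec : Claim_equal_compile_bold_underscore := by
  intro line _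
  unfold Spec_compile_bold_underscore compile_bold_underscore compile_bold_underscore_alt
  rw [pvGoA_eq line.toList (line.toList.length + 1) 0 [] (by omega),
      pvGoB_eq line.toList (line.toList.length + 1) 0 [] (by omega),
      List.nil_append, pvJoinNil, List.flatten_nil, List.nil_append]
  rw [pvAB line.toList line.toList.length 0 (by omega)]
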